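-- pv_equiv track=rewrite | github.com/the16thpythonist/graph_hdc_public | scripts/fetch_small_molecules.py | enumerate_formulas
-- ===== SOURCE A (Python) =====
-- from typing import List, Optional, Set, Tuple
--
-- ENUM_ATOMS = [
--     ("C", "C"),
--     ("N", "N"),
--     ("O", "O"),
--     ("F", "F"),
--     ("S", "S"),
--     ("Cl", "Cl"),
--     ("Br", "Br"),
-- ]
--
-- def enumerate_formulas(min_atoms: int = 3, max_atoms: int = 6) -> List[str]:
--     """Enumerate molecular formulas for *min_atoms*–*max_atoms* heavy atoms.
--
--     At least one carbon is required (organic molecules).  Returns Hill-order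
--     formulas suitable for PubChem's ``fastformula`` endpoint.
--     """
--     formulas = []
--     atom_symbols = [sym for sym, _ in ENUM_ATOMS]
--
--     for n in range(min_atoms, max_atoms + 1):
--         for combo in _compositions(n, len(atom_symbols)):
--             counts = dict(zip(atom_symbols, combo))
--             if counts.get("C", 0) < 1:
--                 continue  # need at least one carbon
--             formula = _counts_to_formula(counts)
--             formulas.append(formula)
--
--     return formulas
--
-- def _compositions(n: int, k: int):
--     """Yield all *k*-tuples of non-negative ints summing to *n*."""
--     if k == 1:
--         yield (n,)
--         return
--     for first in range(n + 1):
--         for rest in _compositions(n - first, k - 1):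
--             yield (first,) + rest
--
-- def _counts_to_formula(counts: dict) -> str:
--     """Convert atom counts to Hill-order molecular formula string."""
--     parts = []
--     # Hill order: C first, then H, then alphabetical
--     for sym in sorted(counts.keys(), key=lambda s: (s != "C", s)):
--         c = counts[sym]
--         if c == 0:
--             continue
--         parts.append(f"{sym}{c}" if c > 1 else sym)
--     return "".join(parts)
-- ===== SOURCE B (Python) =====
-- # Breadth-first worklist enumeration of count tuples (no recursion, no dict/sort per formula):
-- # states hold (partial counts in atom order C,N,O,F,S,Cl,Br, remaining atoms); formulas are
-- # formatted directly from the count tuple in the fixed Hill order C, Br, Cl, F, N, O, S.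
--
-- def _format(counts):
--     cC, cN, cO, cF, cS, cCl, cBr = counts
--     parts = []
--     for sym, c in (("C", cC), ("Br", cBr), ("Cl", cCl), ("F", cF),
--                    ("N", cN), ("O", cO), ("S", cS)):
--         if c != 0:
--             parts.append(sym if c == 1 else sym + str(c))
--     return "".join(parts)
--
-- def enumerate_formulas(min_atoms: int = 3, max_atoms: int = 6):
--     out = []
--     for n in range(min_atoms, max_atoms + 1):
--         # carbon count first (>= 1), then expand the five middle slots; Br takes the remainder
--         states = [([c], n - c) for c in range(1, n + 1)]
--         for _ in range(5):
--             states = [(cs + [c], r - c) for cs, r in states for c in range(r + 1)]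
--         for cs, r in states:
--             out.append(_format(cs + [r]))
--     return out
-- ===== Notes on version B (the rewrite author's own statement) =====
-- stated objective: alternative
-- what changed: Replaces the recursive compositions generator plus a per-formula dict construction and key sort by an iterative breadth-first worklist over partial count tuples, formatting each formula directly from the fixed Hill-ordered tuple positions with no dict or sort.
import Mathlib
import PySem

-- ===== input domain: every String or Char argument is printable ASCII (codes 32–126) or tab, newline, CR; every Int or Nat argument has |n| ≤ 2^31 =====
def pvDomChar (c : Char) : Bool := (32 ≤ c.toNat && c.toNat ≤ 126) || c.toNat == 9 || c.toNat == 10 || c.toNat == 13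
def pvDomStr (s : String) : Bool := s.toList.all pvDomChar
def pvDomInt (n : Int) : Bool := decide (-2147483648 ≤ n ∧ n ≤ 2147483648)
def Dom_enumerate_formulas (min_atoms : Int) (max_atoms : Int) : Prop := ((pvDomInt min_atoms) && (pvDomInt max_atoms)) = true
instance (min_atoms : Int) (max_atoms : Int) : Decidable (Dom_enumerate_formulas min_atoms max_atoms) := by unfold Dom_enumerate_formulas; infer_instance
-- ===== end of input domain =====

-- B replaces A's recursive compositions generator and per-formula dict/sort by a breadth-first
-- worklist over partial count tuples with direct fixed-order formatting (same cost, different structure).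


-- ===== PORT A =====
def pvENUM_ATOMS : List (String × String) :=
  [("C", "C"), ("N", "N"), ("O", "O"), ("F", "F"), ("S", "S"), ("Cl", "Cl"), ("Br", "Br")]

-- _compositions(n, k): Python recurses k → k-1 with base case k == 1.  The k = 0 clause is
-- unreachable in A (A only calls k = 7; Python's recursion would never terminate at k = 0).
def pvA_compositions : Nat → Int → List (List Int)
  | 0, _ => []
  | 1, n => [[n]]
  | (k+2), n =>
      (PySem.List.pyRange 0 (n + 1) 1).flatMap (fun first =>
        (pvA_compositions (k + 1) (n - first)).map (fun rest => first :: rest))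

-- _counts_to_formula; counts[sym] ported as (get? sym).getD 0 — exact here since sym ranges
-- over counts' own keys, so get? is always some.
def pvA_counts_to_formula (counts : PySem.Dict String Int) : String :=
  let parts :=
    (PySem.List.sorted2 counts.keys (fun s => decide (s ≠ "C")) (fun s => s)).foldl
      (fun parts sym =>
        let c := (counts.get? sym).getD 0
        if c = 0 then parts
        else parts ++ [if c > 1 then sym ++ PySem.Int.toStr c else sym]) []
  PySem.Str.join "" parts

def enumerate_formulas (min_atoms : Int) (max_atoms : Int) : List String :=
  let atom_symbols := pvENUM_ATOMS.map (fun p => p.1)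
  (PySem.List.pyRange min_atoms (max_atoms + 1) 1).foldl (fun formulas n =>
    (pvA_compositions atom_symbols.length n).foldl (fun formulas combo =>
      let counts : PySem.Dict String Int := PySem.Dict.ofList (atom_symbols.zip combo)
      if counts.getD "C" 0 < 1 then formulas
      else formulas ++ [pvA_counts_to_formula counts]) formulas) []

-- ===== PORT B =====
-- _format(counts): the unpacking 'cC, cN, … = counts' is the 7-element match (only ever
-- applied to length-7 lists; Python would raise on any other length, the "" arm is unreachable).
def pvB_format (counts : List Int) : String :=
  match counts with
  | [cC, cN, cO, cF, cS, cCl, cBr] =>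
      let parts :=
        ([("C", cC), ("Br", cBr), ("Cl", cCl), ("F", cF), ("N", cN), ("O", cO), ("S", cS)] :
            List (String × Int)).foldl
          (fun parts p =>
            if p.2 ≠ 0 then parts ++ [if p.2 = 1 then p.1 else p.1 ++ PySem.Int.toStr p.2]
            else parts) []
      PySem.Str.join "" parts
  | _ => ""

def enumerate_formulas_alt (min_atoms : Int) (max_atoms : Int) : List String :=
  (PySem.List.pyRange min_atoms (max_atoms + 1) 1).foldl (fun out n =>
    let states0 := (PySem.List.pyRange 1 (n + 1) 1).map (fun c => ([c], n - c))
    let states := (List.range 5).foldl (fun states _ =>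
      states.flatMap (fun st =>
        (PySem.List.pyRange 0 (st.2 + 1) 1).map (fun c => (st.1 ++ [c], st.2 - c)))) states0
    states.foldl (fun out st => out ++ [pvB_format (st.1 ++ [st.2])]) out) []

-- ===== PRECONDITION & SPEC =====
def Spec_enumerate_formulas (min_atoms : Int) (max_atoms : Int) (out : List String) : Prop := out = enumerate_formulas_alt min_atoms max_atoms
instance (min_atoms : Int) (max_atoms : Int) (out : List String) : Decidable (Spec_enumerate_formulas min_atoms max_atoms out) := by unfold Spec_enumerate_formulas; infer_instance

-- ===== CLAIM (what is proved, stated in full; the proofs are below) =====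
def Claim_equal_enumerate_formulas : Prop := ∀ (min_atoms : Int) (max_atoms : Int), Dom_enumerate_formulas min_atoms max_atoms → Spec_enumerate_formulas min_atoms max_atoms (enumerate_formulas min_atoms max_atoms)

-- ===== LEMMAS AND PROOFS =====

-- the common per-n emitted block, used only by the proofs
def pvInner (n : Int) : List String :=
  (PySem.List.pyRange 1 (n + 1) 1).flatMap (fun c0 =>
    (pvA_compositions 6 (n - c0)).map (fun rest => pvB_format (c0 :: rest)))

lemma pv_pyRange_nil {a b : Int} (h : b ≤ a) : PySem.List.pyRange a b 1 = [] := by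
  rw [PySem.List.pyRange_one]
  simp [Int.toNat_of_nonpos (by omega : b - a ≤ 0)]

lemma pv_sorted_keys :
    PySem.List.sorted2 ["C", "N", "O", "F", "S", "Cl", "Br"]
      (fun s => decide (s ≠ "C")) (fun s => s) = ["C", "Br", "Cl", "F", "N", "O", "S"] := by
  norm_num [PySem.List.sorted2, PySem.List.insertBy]
  decide

lemma pv_ite_append {α : Type} (P : Prop) [Decidable P] (A x : List α) :
    (if P then A else A ++ x) = A ++ (if P then [] else x) := by split <;> simp

lemma pv_ite_append' {α : Type} (P : Prop) [Decidable P] (A x : List α) :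
    (if P then A ++ x else A) = A ++ (if P then x else []) := by split <;> simp

lemma pv_seg (sym : String) (c : Int) (h : 0 ≤ c) :
    (if c = 0 then ([] : List String)
     else [if c > 1 then sym ++ PySem.Int.toStr c else sym])
    = (if c ≠ 0 then [if c = 1 then sym else sym ++ PySem.Int.toStr c] else []) := by
  by_cases h0 : c = 0
  · simp [h0]
  · by_cases h1 : c = 1
    · simp [h1]
    · have : c > 1 := by omega
      simp [h0, h1, this]

set_option maxHeartbeats 2000000 in
lemma pv_fmt_eq (c0 c1 c2 c3 c4 c5 c6 : Int) (h0 : 0 ≤ c0) (h1 : 0 ≤ c1) (h2 : 0 ≤ c2)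
    (h3 : 0 ≤ c3) (h4 : 0 ≤ c4) (h5 : 0 ≤ c5) (h6 : 0 ≤ c6) :
    pvA_counts_to_formula
      (PySem.Dict.ofList ((pvENUM_ATOMS.map (fun p => p.1)).zip [c0, c1, c2, c3, c4, c5, c6]))
    = pvB_format [c0, c1, c2, c3, c4, c5, c6] := by
  have hk : (PySem.Dict.ofList ((pvENUM_ATOMS.map (fun p => p.1)).zip [c0, c1, c2, c3, c4, c5, c6])).keys = ["C", "N", "O", "F", "S", "Cl", "Br"] := rfl
  simp only [pvA_counts_to_formula, pvB_format, hk, pv_sorted_keys,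
    List.foldl_cons, List.foldl_nil]
  rw [show ((PySem.Dict.ofList ((pvENUM_ATOMS.map (fun p => p.1)).zip [c0, c1, c2, c3, c4, c5, c6])).get? "C").getD 0 = c0 from rfl,
    show ((PySem.Dict.ofList ((pvENUM_ATOMS.map (fun p => p.1)).zip [c0, c1, c2, c3, c4, c5, c6])).get? "N").getD 0 = c1 from rfl,
    show ((PySem.Dict.ofList ((pvENUM_ATOMS.map (fun p => p.1)).zip [c0, c1, c2, c3, c4, c5, c6])).get? "O").getD 0 = c2 from rfl,
    show ((PySem.Dict.ofList ((pvENUM_ATOMS.map (fun p => p.1)).zip [c0, c1, c2, c3, c4, c5, c6])).get? "F").getD 0 = c3 from rfl,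
    show ((PySem.Dict.ofList ((pvENUM_ATOMS.map (fun p => p.1)).zip [c0, c1, c2, c3, c4, c5, c6])).get? "S").getD 0 = c4 from rfl,
    show ((PySem.Dict.ofList ((pvENUM_ATOMS.map (fun p => p.1)).zip [c0, c1, c2, c3, c4, c5, c6])).get? "Cl").getD 0 = c5 from rfl,
    show ((PySem.Dict.ofList ((pvENUM_ATOMS.map (fun p => p.1)).zip [c0, c1, c2, c3, c4, c5, c6])).get? "Br").getD 0 = c6 from rfl]
  congr 1
  simp only [pv_ite_append, pv_ite_append']
  rw [pv_seg "C" c0 h0, pv_seg "Br" c6 h6, pv_seg "Cl" c5 h5, pv_seg "F" c3 h3,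
    pv_seg "N" c1 h1, pv_seg "O" c2 h2, pv_seg "S" c4 h4]

lemma pv_comp_mem : ∀ (k : Nat) (n : Int) (l : List Int), 0 ≤ n →
    l ∈ pvA_compositions (k + 1) n → l.length = k + 1 ∧ ∀ x ∈ l, 0 ≤ x := by
  intro k
  induction k with
  | zero =>
    intro n l hn hl
    simp [pvA_compositions] at hl
    subst hl
    simpa using hn
  | succ k ih =>
    intro n l hn hl
    simp only [pvA_compositions, List.mem_flatMap, List.mem_map] at hl
    obtain ⟨c, hc, r, hr, rfl⟩ := hl
    rw [PySem.List.mem_pyRange_one] at hc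
    obtain ⟨hlen, hpos⟩ := ih (n - c) r (by omega) hr
    refine ⟨by simp [hlen], ?_⟩
    intro x hx
    rcases List.mem_cons.mp hx with rfl | hx
    · omega
    · exact hpos x hx

lemma pv_len6 (l : List Int) (h : l.length = 6) :
    ∃ a b c d e f, l = [a, b, c, d, e, f] := by
  rcases l with _ | ⟨a, _ | ⟨b, _ | ⟨c, _ | ⟨d, _ | ⟨e, _ | ⟨f, _ | ⟨g, t⟩⟩⟩⟩⟩⟩⟩ <;>
    simp_all

lemma pv_expand_step (k : Nat) (st : List Int × Int) :
    ((PySem.List.pyRange 0 (st.2 + 1) 1).map (fun c => (st.1 ++ [c], st.2 - c))).flatMap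
      (fun st' => (pvA_compositions (k + 1) st'.2).map (fun rest => st'.1 ++ rest))
    = (pvA_compositions (k + 2) st.2).map (fun rest => st.1 ++ rest) := by
  conv_rhs => rw [pvA_compositions]
  rw [List.map_flatMap, List.flatMap_map]
  apply List.flatMap_congr
  intro c _
  simp [List.map_map, Function.comp_def, List.append_assoc]

lemma pv_expand_flatMap (k : Nat) (sts : List (List Int × Int)) :
    (sts.flatMap (fun st =>
        (PySem.List.pyRange 0 (st.2 + 1) 1).map (fun c => (st.1 ++ [c], st.2 - c)))).flatMap
      (fun st => (pvA_compositions (k + 1) st.2).map (fun rest => st.1 ++ rest))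
    = sts.flatMap (fun st => (pvA_compositions (k + 2) st.2).map (fun rest => st.1 ++ rest)) := by
  rw [List.flatMap_assoc]
  exact List.flatMap_congr (fun st _ => pv_expand_step k st)

lemma pv_getD_C (c0 : Int) (rest : List Int) (h : rest.length = 6) :
    (PySem.Dict.ofList ((pvENUM_ATOMS.map (fun p => p.1)).zip (c0 :: rest))).getD "C" 0 = c0 := by
  obtain ⟨a, b, c, d, e, f, rfl⟩ := pv_len6 rest h
  rfl

lemma pv_innerA (n : Int) (acc : List String) :
    (pvA_compositions (pvENUM_ATOMS.map (fun p => p.1)).length n).foldl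
      (fun formulas combo =>
        if (PySem.Dict.ofList ((pvENUM_ATOMS.map (fun p => p.1)).zip combo)).getD "C" 0 < 1
        then formulas
        else formulas ++
          [pvA_counts_to_formula
            (PySem.Dict.ofList ((pvENUM_ATOMS.map (fun p => p.1)).zip combo))]) acc
    = acc ++ pvInner n := by
  rw [PySem.List.foldl_congr_mem' _ _
        (fun formulas combo =>
          if ¬ ((PySem.Dict.ofList ((pvENUM_ATOMS.map (fun p => p.1)).zip combo)).getD "C" 0 < 1)
          then formulas ++
            [pvA_counts_to_formula
              (PySem.Dict.ofList ((pvENUM_ATOMS.map (fun p => p.1)).zip combo))]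
          else formulas) _
        (by
          intro combo _ acc
          by_cases h : (PySem.Dict.ofList
              ((pvENUM_ATOMS.map (fun p => p.1)).zip combo)).getD "C" 0 < 1 <;> simp [h]),
      PySem.List.foldl_append_ite
        (fun combo =>
          ¬ ((PySem.Dict.ofList ((pvENUM_ATOMS.map (fun p => p.1)).zip combo)).getD "C" 0 < 1))
        (fun combo =>
          pvA_counts_to_formula
            (PySem.Dict.ofList ((pvENUM_ATOMS.map (fun p => p.1)).zip combo)))]
  congr 1
  show List.map _ (List.filter _ (pvA_compositions 7 n)) = pvInner n
  rcases lt_or_ge n 0 with hn | hn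
  · rw [show pvA_compositions 7 n
        = (PySem.List.pyRange 0 (n + 1) 1).flatMap (fun first =>
            (pvA_compositions 6 (n - first)).map (fun rest => first :: rest)) from rfl,
      pv_pyRange_nil (by omega : n + 1 ≤ 0), pvInner, pv_pyRange_nil (by omega : n + 1 ≤ 1)]
    simp
  · rw [show pvA_compositions 7 n
        = (PySem.List.pyRange 0 (n + 1) 1).flatMap (fun first =>
            (pvA_compositions 6 (n - first)).map (fun rest => first :: rest)) from rfl,
      PySem.List.pyRange_one_cons (by omega : (0 : Int) < n + 1)]
    rw [show (0 : Int) + 1 = 1 from rfl]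
    rw [List.flatMap_cons, List.filter_append, List.map_append]
    have hhead :
        List.filter
          (fun combo => decide
            (¬ ((PySem.Dict.ofList ((pvENUM_ATOMS.map (fun p => p.1)).zip combo)).getD "C" 0 < 1)))
          ((pvA_compositions 6 (n - 0)).map (fun rest => (0 : Int) :: rest)) = [] := by
      rw [List.filter_map, List.filter_congr (q := fun _ => false) ?_, List.filter_false,
        List.map_nil]
      intro rest hrest
      have hlen := (pv_comp_mem 5 (n - 0) rest (by omega) hrest).1
      simp [pv_getD_C 0 rest hlen]
    rw [hhead, List.map_nil, List.nil_append, List.filter_flatMap, List.map_flatMap, pvInner]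
    apply List.flatMap_congr
    intro c0 hc0
    rw [PySem.List.mem_pyRange_one] at hc0
    rw [List.filter_map, List.filter_congr (q := fun _ => true) ?_, List.filter_true]
    · rw [List.map_map]
      apply List.map_congr_left
      intro rest hrest
      obtain ⟨hlen, hpos⟩ := pv_comp_mem 5 (n - c0) rest (by omega) hrest
      obtain ⟨a, b, c, d, e, f, rfl⟩ := pv_len6 rest hlen
      have h0 : (0 : Int) ≤ c0 := by omega
      exact pv_fmt_eq c0 a b c d e f h0 (hpos a (by simp)) (hpos b (by simp)) (hpos c (by simp))
        (hpos d (by simp)) (hpos e (by simp)) (hpos f (by simp))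
    · intro rest hrest
      have hlen := (pv_comp_mem 5 (n - c0) rest (by omega) hrest).1
      simp [pv_getD_C c0 rest hlen]
      omega

lemma pv_innerB (n : Int) (acc : List String) :
    ((List.range 5).foldl (fun states _ =>
        states.flatMap (fun st =>
          (PySem.List.pyRange 0 (st.2 + 1) 1).map (fun c => (st.1 ++ [c], st.2 - c))))
      ((PySem.List.pyRange 1 (n + 1) 1).map (fun c => ([c], n - c)))).foldl
      (fun out st => out ++ [pvB_format (st.1 ++ [st.2])]) acc
    = acc ++ pvInner n := by
  rw [PySem.List.foldl_append_singleton_eq_map]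
  congr 1
  rw [show List.range 5 = [0, 1, 2, 3, 4] from rfl]
  simp only [List.foldl_cons, List.foldl_nil]
  have h1 : ∀ sts : List (List Int × Int),
      sts.map (fun st => pvB_format (st.1 ++ [st.2]))
      = (sts.flatMap (fun st =>
          (pvA_compositions 1 st.2).map (fun rest => st.1 ++ rest))).map pvB_format := by
    intro sts
    simp [pvA_compositions, ← List.map_eq_flatMap, List.map_map, Function.comp_def]
  rw [h1, pv_expand_flatMap, pv_expand_flatMap, pv_expand_flatMap, pv_expand_flatMap,
    pv_expand_flatMap, List.flatMap_map, List.map_flatMap, pvInner]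
  apply List.flatMap_congr
  intro c _
  simp [List.map_map, Function.comp_def]

-- ===== VERDICT (by name: the statement is the Claim_ definition above) =====
theorem enumerate_formulas_spec : Claim_equal_enumerate_formulas := by
  intro mn mx _
  unfold Spec_enumerate_formulas
  simp only [enumerate_formulas, enumerate_formulas_alt]
  rw [PySem.List.foldl_congr_mem' _ _ (fun acc n => acc ++ pvInner n) _
        (fun n _ acc => pv_innerA n acc),
      PySem.List.foldl_congr_mem' _ _ (fun acc n => acc ++ pvInner n) _
        (fun n _ acc => pv_innerB n acc)]
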